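-- pv_equiv track=rewrite | github.com/Nyfeu/NPU | sim/test_array.py | skew_input_matrix
-- ===== SOURCE A (Python) =====
-- def skew_input_matrix(matrix):
--     """
--     Transforma uma matriz N x ROWS em uma sequência temporal "inclinada".
--     Linha 0 entra no tempo T.
--     Linha 1 entra no tempo T+1.
--     ...
--     Retorna uma lista de vetores para injetar ciclo a ciclo.
--     """
--     num_vecs = len(matrix)     # Quantidade de vetores de entrada
--     rows = len(matrix[0])      # Altura do Array (dimensão dos vetores)
--
--     # O tempo total é o número de vetores + o atraso da última linha
--     total_cycles = num_vecs + rows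
--
--     skewed_stream = []
--
--     for t in range(total_cycles):
--         current_input = []
--         for r in range(rows):
--             # O dado da linha 'r' no tempo 't' corresponde ao vetor original 't - r'
--             vec_idx = t - r
--             if 0 <= vec_idx < num_vecs:
--                 val = matrix[vec_idx][r]
--             else:
--                 val = 0 # Padding com zero fora dos limites
--             current_input.append(val)
--         skewed_stream.append(current_input)
--
--     return skewed_stream
-- ===== SOURCE B (Python) =====
-- def skew_input_matrix(matrix):
--     rows = len(matrix[0])
--     total_cycles = len(matrix) + rows
--     skewed_stream = [[0] * rows for _ in range(total_cycles)]
--     for vec_idx, vec in enumerate(matrix):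
--         for r in range(rows):
--             skewed_stream[vec_idx + r][r] = vec[r]
--     return skewed_stream
-- ===== Notes on version B (the rewrite author's own statement) =====
-- stated objective: alternative
-- what changed: A gathers each output cell with a per-cell bounds check over all total_cycles*rows candidates; B allocates the full zero-padded total_cycles*rows stream once and scatters each input value matrix[v][r] into its skewed slot [v+r][r], removing the per-cell conditional.
import Mathlib
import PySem

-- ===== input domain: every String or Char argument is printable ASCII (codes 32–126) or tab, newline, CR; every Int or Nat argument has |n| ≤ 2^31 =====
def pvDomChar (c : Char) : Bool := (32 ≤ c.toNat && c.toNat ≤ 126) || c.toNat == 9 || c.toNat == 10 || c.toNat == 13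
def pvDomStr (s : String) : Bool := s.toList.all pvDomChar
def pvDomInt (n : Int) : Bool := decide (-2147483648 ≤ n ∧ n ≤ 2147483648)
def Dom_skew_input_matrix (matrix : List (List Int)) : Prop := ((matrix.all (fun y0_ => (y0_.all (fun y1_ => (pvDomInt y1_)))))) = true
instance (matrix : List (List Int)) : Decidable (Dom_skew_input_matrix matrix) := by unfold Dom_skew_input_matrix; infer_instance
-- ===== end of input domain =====

-- B rewrites A's per-cell gather with bounds check as a zero-filled allocation
-- followed by a scatter of each input value into its skewed slot (objective:
-- alternative decomposition, same asymptotic cost).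

-- ===== PORT A =====
-- literal transliteration of Source A: for each cycle t and lane r, gather
-- matrix[t-r][r] when 0 <= t-r < num_vecs, else pad with 0.
def skew_input_matrix (matrix : List (List Int)) : List (List Int) :=
  let num_vecs : Int := matrix.length
  let rows : Int := (((PySem.List.pyGet? matrix 0).getD []).length : Int)
  let total_cycles : Int := num_vecs + rows
  (PySem.List.pyRange 0 total_cycles 1).foldl
    (fun skewed t =>
      skewed ++
        [(PySem.List.pyRange 0 rows 1).foldl
          (fun cur r =>
            let vec_idx := t - r
            let val : Int :=
              if 0 ≤ vec_idx ∧ vec_idx < num_vecs then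
                (PySem.List.pyGet? ((PySem.List.pyGet? matrix vec_idx).getD []) r).getD 0
              else 0
            cur ++ [val]) []]) []

-- ===== PORT B =====
-- skewed_stream[i][j] = v on independent rows: replace row i by its update
-- (exact for Python's in-place assignment because Source B builds independent rows)
def pvSet2 (g : List (List Int)) (i j : Nat) (v : Int) : List (List Int) :=
  g.set i ((g.getD i []).set j v)
-- literal transliteration of Source B: allocate total_cycles x rows zeros, then
-- scatter vec[r] into slot [vec_idx + r][r] for each (vec_idx, vec) of
-- enumerate(matrix) (zipIdx carries the same index, pair order swapped;
-- vec[r] is in range under Pre_, so getD's default is unreached there).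
def skew_input_matrix_alt (matrix : List (List Int)) : List (List Int) :=
  let rows : Nat := ((PySem.List.pyGet? matrix 0).getD []).length
  let total_cycles : Nat := matrix.length + rows
  let init : List (List Int) := List.replicate total_cycles (List.replicate rows 0)
  matrix.zipIdx.foldl
    (fun g p =>
      (List.range rows).foldl (fun g r => pvSet2 g (p.2 + r) r (p.1.getD r 0)) g)
    init

-- ===== PRECONDITION & SPEC =====
-- Pre_ excludes exactly the inputs where Python A raises IndexError: the empty
-- matrix (matrix[0]) and ragged matrices having a row shorter than row 0
-- (matrix[vec_idx][r], r < len(matrix[0])). Python B raises on the same inputs.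
def Pre_skew_input_matrix (matrix : List (List Int)) : Prop :=
  matrix ≠ [] ∧ ∀ row ∈ matrix, (matrix.headD []).length ≤ row.length
instance (matrix : List (List Int)) : Decidable (Pre_skew_input_matrix matrix) := by
  unfold Pre_skew_input_matrix; infer_instance

def pvWitness_skew_input_matrix : List (List Int) := [[1, 2], [3, 4], [5, 6]]

def Spec_skew_input_matrix (matrix : List (List Int)) (out : List (List Int)) : Prop := out = skew_input_matrix_alt matrix
instance (matrix : List (List Int)) (out : List (List Int)) : Decidable (Spec_skew_input_matrix matrix out) := by unfold Spec_skew_input_matrix; infer_instance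

-- ===== CLAIM (what is proved, stated in full; the proofs are below) =====
def Claim_equal_skew_input_matrix : Prop := ∀ (matrix : List (List Int)), Dom_skew_input_matrix matrix → Pre_skew_input_matrix matrix → Spec_skew_input_matrix matrix (skew_input_matrix matrix)

-- ===== LEMMAS AND PROOFS =====
-- both ports are reduced to the same closed normal form pvSpec:
-- row t, lane r carries matrix[t-r][r] when 0 ≤ t-r < len(matrix), else 0
def pvRows (matrix : List (List Int)) : Nat := (matrix.headD []).length
def pvCell (matrix : List (List Int)) (t r : Nat) : Int :=
  if r ≤ t ∧ t - r < matrix.length then (matrix.getD (t - r) []).getD r 0 else 0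
def pvSpec (matrix : List (List Int)) : List (List Int) :=
  (List.range (matrix.length + pvRows matrix)).map
    (fun t => (List.range (pvRows matrix)).map (pvCell matrix t))

def pvGet2 (g : List (List Int)) (i j : Nat) : Int := (g.getD i []).getD j 0

lemma pv_getD_set {α : Type} (l : List α) (i i' : Nat) (a d : α) :
    (l.set i a).getD i' d = if i' = i ∧ i < l.length then a else l.getD i' d := by
  simp only [List.getD_eq_getElem?_getD, List.getElem?_set]
  by_cases h1 : i = i'
  · subst h1
    by_cases h2 : i < l.length
    · simp [h2]
    · simp [h2]
  · rw [if_neg h1, if_neg (fun h => h1 h.1.symm)]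

lemma pv_len_set2 (g : List (List Int)) (i j : Nat) (v : Int) :
    (pvSet2 g i j v).length = g.length := by simp [pvSet2]

lemma pv_rowlen_set2 (g : List (List Int)) (i j : Nat) (v : Int) (i' : Nat) :
    ((pvSet2 g i j v).getD i' []).length = (g.getD i' []).length := by
  rw [pvSet2, pv_getD_set]
  split_ifs with h
  · rw [h.1, List.length_set]
  · rfl

lemma pv_get2_set2 (g : List (List Int)) (i j : Nat) (v : Int) (i' j' : Nat) :
    pvGet2 (pvSet2 g i j v) i' j' =
      if i' = i ∧ j' = j ∧ i < g.length ∧ j < (g.getD i []).length then v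
      else pvGet2 g i' j' := by
  rw [pvGet2, pvSet2, pv_getD_set]
  by_cases h : i' = i ∧ i < g.length
  · rw [if_pos h, pv_getD_set]
    by_cases h2 : j' = j ∧ j < (g.getD i []).length
    · rw [if_pos h2, if_pos ⟨h.1, h2.1, h.2, h2.2⟩]
    · rw [if_neg h2, if_neg (fun hc => h2 ⟨hc.2.1, hc.2.2.2⟩), pvGet2, h.1]
  · rw [if_neg h, if_neg (fun hc => h ⟨hc.1, hc.2.2.1⟩), pvGet2]

-- inner fold: scatter vec into column slots r at row i+r, r < m
lemma pv_scat1 (vec : List Int) (i m : Nat) (g : List (List Int)) :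
    (((List.range m).foldl (fun g r => pvSet2 g (i + r) r (vec.getD r 0)) g).length = g.length)
    ∧ (∀ i', ((((List.range m).foldl (fun g r => pvSet2 g (i + r) r (vec.getD r 0)) g)).getD i' []).length = (g.getD i' []).length)
    ∧ ((∀ i' < g.length, ((g.getD i' []).length) = (g.getD i []).length) → i + m ≤ g.length → m ≤ (g.getD i []).length →
        ∀ i' j', pvGet2 ((List.range m).foldl (fun g r => pvSet2 g (i + r) r (vec.getD r 0)) g) i' j' =
          if j' < m ∧ i' = i + j' then vec.getD j' 0 else pvGet2 g i' j') := by
  induction m with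
  | zero => simp
  | succ m ih =>
    rw [List.range_succ, List.foldl_append]
    simp only [List.foldl_cons, List.foldl_nil]
    refine ⟨by rw [pv_len_set2, ih.1], fun i' => by rw [pv_rowlen_set2, ih.2.1], ?_⟩
    intro hrows hlen hm i' j'
    set g1 := (List.range m).foldl (fun g r => pvSet2 g (i + r) r (vec.getD r 0)) g with hg1
    have hchar := ih.2.2 hrows (by omega) (by omega)
    rw [pv_get2_set2, ih.1, ih.2.1]
    by_cases hc : i' = i + m ∧ j' = m ∧ i + m < g.length ∧ m < (g.getD (i + m) []).length
    · rw [if_pos hc, if_pos (by omega : j' < m + 1 ∧ i' = i + j')]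
      rw [hc.2.1]
    · rw [if_neg hc, hchar]
      have hml : m < (g.getD (i + m) []).length := by
        rw [hrows (i + m) (by omega)]; omega
      by_cases hd : j' < m ∧ i' = i + j'
      · rw [if_pos hd, if_pos (by omega)]
      · rw [if_neg hd, if_neg (by omega)]

def pvStep (rows : Nat) (g : List (List Int)) (p : List Int × Nat) : List (List Int) :=
  (List.range rows).foldl (fun g r => pvSet2 g (p.2 + r) r (p.1.getD r 0)) g

lemma pv_scatAll (vecs : List (List Int)) (k : Nat) (g : List (List Int)) (rows : Nat)
    (hlen : ∀ i' < g.length, (g.getD i' []).length = rows)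
    (hk : k + vecs.length + rows ≤ g.length + 1) :
    (((vecs.zipIdx k).foldl (pvStep rows) g).length = g.length)
    ∧ (∀ i' < g.length, (((vecs.zipIdx k).foldl (pvStep rows) g).getD i' []).length = rows)
    ∧ ∀ i' j', pvGet2 ((vecs.zipIdx k).foldl (pvStep rows) g) i' j' =
        if j' < rows ∧ k + j' ≤ i' ∧ i' < k + vecs.length + j' then
          (vecs.getD (i' - j' - k) []).getD j' 0
        else pvGet2 g i' j' := by
  induction vecs generalizing k g with
  | nil =>
    refine ⟨rfl, fun i' h => hlen i' h, fun i' j' => ?_⟩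
    rw [if_neg (by simp only [List.length_nil]; omega)]
    simp [List.zipIdx]
  | cons v vs ih =>
    rw [List.zipIdx_cons, List.foldl_cons]
    have hstep : pvStep rows g (v, k)
        = (List.range rows).foldl (fun g r => pvSet2 g (k + r) r (v.getD r 0)) g := rfl
    rw [hstep]
    set g1 := (List.range rows).foldl (fun g r => pvSet2 g (k + r) r (v.getD r 0)) g with hg1def
    have hS := pv_scat1 v k rows g
    have hkr : k + rows ≤ g.length := by simp at hk; omega
    have hrowk : (g.getD k []).length = rows := by
      by_cases hkl : k < g.length
      · exact hlen k hkl
      · have : rows = 0 := by omega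
        rw [List.getD_eq_default _ _ (by omega)]
        simp [this]
    have hchar := hS.2.2 (fun i' hi' => by rw [hlen i' hi', hrowk]) hkr (by omega)
    have hg1len : g1.length = g.length := hS.1
    have hg1rows : ∀ i' < g1.length, (g1.getD i' []).length = rows := by
      intro i' hi'
      rw [hS.2.1 i', hlen i' (by omega)]
    have hIH := ih k.succ g1 hg1rows (by simp at hk; omega)
    refine ⟨by rw [hIH.1, hg1len], fun i' hi' => by rw [hIH.2.1 i' (by omega)], ?_⟩
    intro i' j'
    rw [hIH.2.2 i' j']
    by_cases hc : j' < rows ∧ k + j' ≤ i' ∧ i' < k + (v :: vs).length + j'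
    · by_cases hh : i' = k + j'
      · rw [if_neg (by omega), hchar i' j', if_pos (by omega), if_pos hc]
        have h0 : i' - j' - k = 0 := by omega
        simp [hh]
      · rw [if_pos (by simp at hc ⊢; omega), if_pos hc]
        have h1 : i' - j' - k.succ + 1 = i' - j' - k := by omega
        rw [← h1]
        simp
    · rw [if_neg (by simp at hc ⊢; omega), if_neg hc, hchar i' j',
        if_neg (by simp at hc ⊢; omega)]

lemma pv_replicate_getD (t R i : Nat) :
    ((List.replicate t (List.replicate R (0:Int))).getD i []).length = if i < t then R else 0 := by
  simp only [List.getD_eq_getElem?_getD, List.getElem?_replicate]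
  split_ifs <;> simp

lemma pv_replicate_get2 (t R i j : Nat) :
    pvGet2 (List.replicate t (List.replicate R (0:Int))) i j = 0 := by
  simp only [pvGet2, List.getD_eq_getElem?_getD, List.getElem?_replicate]
  split_ifs <;> simp [List.getElem?_replicate]
  split_ifs <;> simp

lemma pvB_eq_spec (matrix : List (List Int)) : skew_input_matrix_alt matrix = pvSpec matrix := by
  unfold skew_input_matrix_alt
  have hr : ((PySem.List.pyGet? matrix 0).getD []) = matrix.headD [] := by
    cases matrix <;> simp [PySem.List.pyGet?_zero]
  rw [hr]
  dsimp only
  show (matrix.zipIdx 0).foldl (pvStep (matrix.headD []).length)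
      (List.replicate (matrix.length + (matrix.headD []).length)
        (List.replicate (matrix.headD []).length 0)) = pvSpec matrix
  have hall := pv_scatAll matrix 0
      (List.replicate (matrix.length + (matrix.headD []).length)
        (List.replicate (matrix.headD []).length 0)) (matrix.headD []).length
      (fun i' hi' => by rw [pv_replicate_getD, if_pos (by simpa using hi')])
      (by simp)
  apply List.ext_getElem
  · rw [hall.1]
    simp [pvSpec, pvRows]
  · intro i h1 h2
    have hi : i < matrix.length + (matrix.headD []).length := by
      have := hall.1
      simp only [this, List.length_replicate] at h1
      omega
    have hspec : (pvSpec matrix)[i]'h2 = (List.range (pvRows matrix)).map (pvCell matrix i) := by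
      simp [pvSpec]
    rw [hspec]
    have hrlen : (((matrix.zipIdx 0).foldl (pvStep (matrix.headD []).length)
        (List.replicate (matrix.length + (matrix.headD []).length)
          (List.replicate (matrix.headD []).length 0)))[i]'h1).length
        = (matrix.headD []).length := by
      rw [← List.getD_eq_getElem _ [] h1]
      exact hall.2.1 i (by simpa using hi)
    apply List.ext_getElem
    · rw [hrlen]
      simp [pvRows]
    · intro j hj1 hj2
      have hjR : j < (matrix.headD []).length := by rw [hrlen] at hj1; exact hj1
      have hv : (((matrix.zipIdx 0).foldl (pvStep (matrix.headD []).length)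
          (List.replicate (matrix.length + (matrix.headD []).length)
            (List.replicate (matrix.headD []).length 0)))[i]'h1)[j]'hj1
          = pvGet2 ((matrix.zipIdx 0).foldl (pvStep (matrix.headD []).length)
              (List.replicate (matrix.length + (matrix.headD []).length)
                (List.replicate (matrix.headD []).length 0))) i j := by
        rw [pvGet2, List.getD_eq_getElem _ [] h1, List.getD_eq_getElem _ _ (by omega)]
      rw [hv, hall.2.2 i j, pv_replicate_get2]
      simp only [List.getElem_map, List.getElem_range]
      unfold pvCell
      by_cases hc : j ≤ i ∧ i - j < matrix.length
      · rw [if_pos (by omega), if_pos hc]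
        simp
      · rw [if_neg (by omega), if_neg hc]

lemma pvA_eq_spec (matrix : List (List Int)) : skew_input_matrix matrix = pvSpec matrix := by
  unfold skew_input_matrix pvSpec
  have hr : ((PySem.List.pyGet? matrix 0).getD []) = matrix.headD [] := by
    cases matrix <;> simp [PySem.List.pyGet?_zero]
  rw [hr]
  dsimp only
  simp only [PySem.List.pyRange_one, PySem.List.foldl_append_singleton_eq_map,
    List.nil_append, List.map_map]
  have hN : (((matrix.length : Int) + ((matrix.headD []).length : Int)) - 0).toNat
      = matrix.length + pvRows matrix := by simp [pvRows]; omega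
  have hR : (((matrix.headD []).length : Int) - 0).toNat = pvRows matrix := by simp [pvRows]
  rw [hN, hR]
  apply List.map_congr_left
  intro k hk
  simp only [Function.comp]
  apply List.map_congr_left
  intro j hj
  simp only [Function.comp_apply, zero_add]
  simp only [List.mem_range] at *
  unfold pvCell
  by_cases h : j ≤ k ∧ k - j < matrix.length
  · have hidx : (k:Int) - (j:Int) = ((k - j : Nat) : Int) := by omega
    rw [hidx, if_pos (show (0:Int) ≤ ((k-j:Nat):Int) ∧ ((k-j:Nat):Int) < (matrix.length:Int) by omega), if_pos h]
    simp [PySem.List.pyGet?_natCast, List.getD_eq_getElem?_getD]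
  · rw [if_neg (by omega)]
    rw [if_neg h]

-- ===== VERDICT (by name: the statement is the Claim_ definition above) =====
theorem skew_input_matrix_spec : Claim_equal_skew_input_matrix := by
  intro matrix _ _
  unfold Spec_skew_input_matrix
  rw [pvA_eq_spec, pvB_eq_spec]
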